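-- pv_equiv track=rewrite | github.com/victorsemenov1980/Coding-challenges | notVerySecure.py | alphanumeric
-- ===== SOURCE A (Python) =====
-- def alphanumeric(password):
--     if password=='':
--         return False
--     else:
--         import string
--         x=string.ascii_lowercase
--         y=string.ascii_uppercase
--         z=[0,1,2,3,4,5,6,7,8,9]
--         total=[]
--         for i in x:
--             total.append(i)
--         for i in y:
--             total.append(i)
--         for i in z:
--             total.append(str(i))
--         counter=0
--         for char in password:
--
--             if char not in total:
--
--                 counter+=1
--             else:
--                 counter+=0
--         if counter!=0:
--             return False
--         else:
--             return True
-- ===== SOURCE B (Python) =====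
-- def alphanumeric(password):
--     # Match the regex [A-Za-z0-9]+ against the whole string via Brzozowski
--     # derivatives: repeatedly differentiate the pattern by each character and
--     # accept iff the final residual pattern is nullable.
--     EMP = ('emp',)
--     EPS = ('eps',)
--     CLS = ('cls',)  # the character class [A-Za-z0-9]
--
--     def nullable(r):
--         t = r[0]
--         if t == 'eps' or t == 'star':
--             return True
--         if t == 'cat':
--             return nullable(r[1]) and nullable(r[2])
--         if t == 'alt':
--             return nullable(r[1]) or nullable(r[2])
--         return False  # emp, cls
--
--     def in_cls(ch):
--         return 'a' <= ch <= 'z' or 'A' <= ch <= 'Z' or '0' <= ch <= '9'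
--
--     def cat(a, b):  # smart constructor
--         if a == EMP or b == EMP:
--             return EMP
--         if a == EPS:
--             return b
--         if b == EPS:
--             return a
--         return ('cat', a, b)
--
--     def alt(a, b):  # smart constructor
--         if a == EMP:
--             return b
--         if b == EMP:
--             return a
--         return ('alt', a, b)
--
--     def deriv(r, ch):
--         t = r[0]
--         if t == 'cls':
--             return EPS if in_cls(ch) else EMP
--         if t == 'cat':
--             d = cat(deriv(r[1], ch), r[2])
--             return alt(d, deriv(r[2], ch)) if nullable(r[1]) else d
--         if t == 'alt':
--             return alt(deriv(r[1], ch), deriv(r[2], ch))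
--         if t == 'star':
--             return cat(deriv(r[1], ch), r)
--         return EMP  # emp, eps
--
--     r = ('cat', CLS, ('star', CLS))  # [A-Za-z0-9]+
--     for ch in password:
--         r = deriv(r, ch)
--     return nullable(r)
-- ===== Notes on version B (the rewrite author's own statement) =====
-- stated objective: alternative
-- what changed: Replaced the hand-built 62-entry allowed-character table, per-character membership scan and mismatch counter with full-regex matching of [A-Za-z0-9]+ by Brzozowski derivatives (accept iff the residual pattern after consuming the string is nullable).
import Mathlib
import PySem

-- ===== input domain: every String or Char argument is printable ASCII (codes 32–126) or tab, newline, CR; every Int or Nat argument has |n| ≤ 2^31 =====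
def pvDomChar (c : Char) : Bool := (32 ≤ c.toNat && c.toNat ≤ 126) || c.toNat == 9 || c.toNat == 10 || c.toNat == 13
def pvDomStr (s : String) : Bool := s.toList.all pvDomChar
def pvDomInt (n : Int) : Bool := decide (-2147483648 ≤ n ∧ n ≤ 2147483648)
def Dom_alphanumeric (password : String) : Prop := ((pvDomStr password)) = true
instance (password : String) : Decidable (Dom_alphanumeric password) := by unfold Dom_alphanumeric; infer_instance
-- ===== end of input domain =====

-- B replaces A's hand-built allowed-character table, membership scan and mismatch
-- counter with full-regex matching of [A-Za-z0-9]+ via Brzozowski derivatives (alternative algorithm).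

-- ===== PORT A =====
-- A's table 'total' holds one-character strings (letters and str(i)); ported as List (List Char).
def alphanumeric (password : String) : Bool :=
  if password.toList = [] then false
  else
    let x := "abcdefghijklmnopqrstuvwxyz".toList
    let y := "ABCDEFGHIJKLMNOPQRSTUVWXYZ".toList
    let z : List Int := [0,1,2,3,4,5,6,7,8,9]
    let total : List (List Char) :=
      ((x.foldl (fun acc i => acc ++ [[i]]) []
        |> fun t => y.foldl (fun acc i => acc ++ [[i]]) t)
        |> fun t => z.foldl (fun acc i => acc ++ [PySem.Int.toChars i]) t)
    let counter : Int :=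
      password.toList.foldl
        (fun counter char => if ¬ (total.contains [char]) then counter + 1 else counter + 0) 0
    if counter ≠ 0 then false else true

-- ===== PORT B =====
-- Source B's tuple-encoded regexes become an inductive type; 'cls' is the class [A-Za-z0-9].
inductive Rx : Type
  | emp : Rx
  | eps : Rx
  | cls : Rx
  | cat : Rx → Rx → Rx
  | alt : Rx → Rx → Rx
  | star : Rx → Rx
deriving DecidableEq, Repr

def rxNullable : Rx → Bool
  | Rx.eps => true
  | Rx.star _ => true
  | Rx.cat a b => rxNullable a && rxNullable b
  | Rx.alt a b => rxNullable a || rxNullable b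
  | _ => false

def rxInCls (ch : Char) : Bool :=
  ('a' ≤ ch && ch ≤ 'z') || ('A' ≤ ch && ch ≤ 'Z') || ('0' ≤ ch && ch ≤ '9')

def rxCat (a b : Rx) : Rx :=
  if a = Rx.emp ∨ b = Rx.emp then Rx.emp
  else if a = Rx.eps then b
  else if b = Rx.eps then a
  else Rx.cat a b

def rxAlt (a b : Rx) : Rx :=
  if a = Rx.emp then b
  else if b = Rx.emp then a
  else Rx.alt a b

def rxDeriv (r : Rx) (ch : Char) : Rx :=
  match r with
  | Rx.cls => if rxInCls ch then Rx.eps else Rx.emp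
  | Rx.cat a b =>
      let d := rxCat (rxDeriv a ch) b
      if rxNullable a then rxAlt d (rxDeriv b ch) else d
  | Rx.alt a b => rxAlt (rxDeriv a ch) (rxDeriv b ch)
  | Rx.star a => rxCat (rxDeriv a ch) r
  | _ => Rx.emp

def alphanumeric_alt (password : String) : Bool :=
  let r0 : Rx := Rx.cat Rx.cls (Rx.star Rx.cls)   -- [A-Za-z0-9]+
  rxNullable (password.toList.foldl rxDeriv r0)

-- ===== PRECONDITION & SPEC =====
def Spec_alphanumeric (password : String) (out : Bool) : Prop := out = alphanumeric_alt password
instance (password : String) (out : Bool) : Decidable (Spec_alphanumeric password out) := by unfold Spec_alphanumeric; infer_instance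

-- ===== CLAIM (what is proved, stated in full; the proofs are below) =====
def Claim_equal_alphanumeric : Prop := ∀ (password : String), Dom_alphanumeric password → Spec_alphanumeric password (alphanumeric password)

-- ===== LEMMAS AND PROOFS =====

-- A's table, as a standalone definition (definitionally the 'total' built inside the port).
def pvTotal : List (List Char) :=
  ((("abcdefghijklmnopqrstuvwxyz".toList).foldl (fun acc i => acc ++ [[i]]) []
    |> fun t => ("ABCDEFGHIJKLMNOPQRSTUVWXYZ".toList).foldl (fun acc i => acc ++ [[i]]) t)
    |> fun t => ([0,1,2,3,4,5,6,7,8,9] : List Int).foldl (fun acc i => acc ++ [PySem.Int.toChars i]) t)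

theorem pvTotal_eq : pvTotal = [['a'],['b'],['c'],['d'],['e'],['f'],['g'],['h'],['i'],['j'],['k'],['l'],['m'],['n'],['o'],['p'],['q'],['r'],['s'],['t'],['u'],['v'],['w'],['x'],['y'],['z'],['A'],['B'],['C'],['D'],['E'],['F'],['G'],['H'],['I'],['J'],['K'],['L'],['M'],['N'],['O'],['P'],['Q'],['R'],['S'],['T'],['U'],['V'],['W'],['X'],['Y'],['Z'],['0'],['1'],['2'],['3'],['4'],['5'],['6'],['7'],['8'],['9']] := by
  decide

theorem char_eq_iff (c d : Char) : (c = d) ↔ c.toNat = d.toNat := by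
  constructor
  · rintro rfl; rfl
  · intro h; exact Char.ext (UInt32.toNat_inj.mp h)

-- charwise: membership in A's table ↔ B's character-class test
theorem mem_total_iff (c : Char) : pvTotal.contains [c] = rxInCls c := by
  rw [Bool.eq_iff_iff]
  simp only [pvTotal_eq, rxInCls, List.contains_eq_mem, List.mem_cons, List.not_mem_nil, or_false,
    List.cons.injEq, and_true, Bool.and_eq_true, Bool.or_eq_true, decide_eq_true_eq,
    Char.le_def, UInt32.le_iff_toNat_le, char_eq_iff]
  simp only [Char.toNat_val, Char.reduceToNat]
  omega

-- loop invariant: A's counter accumulates the number of characters outside the table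
theorem counter_foldl (l : List Char) (acc : Int) :
    l.foldl (fun counter char => if ¬ (pvTotal.contains [char]) then counter + 1 else counter + 0) acc
      = acc + ((l.countP (fun c => !pvTotal.contains [c])) : Int) := by
  induction l generalizing acc with
  | nil => simp
  | cons c t ih =>
    rw [List.foldl_cons]
    by_cases h : pvTotal.contains [c] = true
    · rw [if_neg (not_not_intro h), ih, List.countP_cons]
      simp only [h, Bool.not_true, Bool.false_eq_true, if_false]
      omega
    · rw [if_pos h, ih, List.countP_cons]
      simp only [h, Bool.not_false, if_pos]
      omega

-- the dead state is absorbing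
theorem foldl_deriv_emp (l : List Char) : l.foldl rxDeriv Rx.emp = Rx.emp := by
  induction l with
  | nil => rfl
  | cons c t ih => simpa [rxDeriv] using ih

-- the derivative of the looping state star cls
theorem deriv_star_cls (c : Char) :
    rxDeriv (Rx.star Rx.cls) c = if rxInCls c then Rx.star Rx.cls else Rx.emp := by
  by_cases h : rxInCls c = true <;> simp [rxDeriv, rxCat, h]

-- folding derivatives from star cls stays in star cls exactly while all chars are in the class
theorem foldl_deriv_star (l : List Char) :
    l.foldl rxDeriv (Rx.star Rx.cls)
      = if l.all rxInCls then Rx.star Rx.cls else Rx.emp := by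
  induction l with
  | nil => rfl
  | cons c t ih =>
    rw [List.foldl_cons, deriv_star_cls]
    by_cases h : rxInCls c = true
    · simpa [h] using ih
    · simp [h, foldl_deriv_emp]

-- B's result, characterised
theorem alt_characterised (l : List Char) :
    rxNullable (l.foldl rxDeriv (Rx.cat Rx.cls (Rx.star Rx.cls)))
      = (decide (l ≠ []) && l.all rxInCls) := by
  cases l with
  | nil => rfl
  | cons c t =>
    rw [List.foldl_cons]
    have hd : rxDeriv (Rx.cat Rx.cls (Rx.star Rx.cls)) c
        = if rxInCls c then Rx.star Rx.cls else Rx.emp := by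
      by_cases h : rxInCls c = true <;> simp [rxDeriv, rxNullable, rxCat, h]
    rw [hd]
    by_cases h : rxInCls c = true
    · rw [if_pos h, foldl_deriv_star]
      by_cases ht : t.all rxInCls = true <;> simp [ht, h, rxNullable]
    · simp [h, foldl_deriv_emp, rxNullable]

-- ===== VERDICT (by name: the statement is the Claim_ definition above) =====
theorem alphanumeric_spec : Claim_equal_alphanumeric := by
  intro password _
  unfold Spec_alphanumeric alphanumeric alphanumeric_alt
  rw [alt_characterised]
  by_cases hnil : password.toList = []
  · simp [hnil]
  · rw [if_neg hnil]
    show (if (password.toList.foldl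
          (fun counter char => if ¬ (pvTotal.contains [char]) then counter + 1 else counter + 0)
          (0 : Int)) ≠ 0 then false else true)
        = (decide (password.toList ≠ []) && password.toList.all rxInCls)
    rw [counter_foldl]
    simp only [zero_add]
    have hd : decide (password.toList ≠ []) = true := by simp [hnil]
    rw [hd, Bool.true_and]
    by_cases hall : password.toList.all rxInCls = true
    · have h0 : password.toList.countP (fun c => !pvTotal.contains [c]) = 0 :=
        List.countP_eq_zero.mpr (fun a ha => by
          simp only [mem_total_iff, List.all_eq_true.mp hall a ha, Bool.not_true,
            Bool.false_eq_true, not_false_eq_true])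
      rw [h0, hall]
      norm_num
    · have hne : password.toList.countP (fun c => !pvTotal.contains [c]) ≠ 0 := by
        intro h0
        exact hall (List.all_eq_true.mpr (fun a ha => by
          have h1 := List.countP_eq_zero.mp h0 a ha
          rw [← mem_total_iff]
          simpa using h1))
      rw [if_pos (by exact_mod_cast hne), (Bool.eq_false_iff.mpr hall).symm]
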